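-- pv_equiv track=rewrite | github.com/pypi-data/pypi-mirror-31 | packages/md2tex/md2tex-0.0.5.tar.gz/md2tex-0.0.5/md2tex.py | split_code
-- ===== SOURCE A (Python) =====
-- def split_code(s):
--     lnormal, lcode, lindent, ltable, lquote = [], [], [], [], []
--     for t in s.splitlines():
--         if t.startswith('    '):
--             lcode.append(t)
--         elif t.startswith(('- ', '  - ', '    - ')):
--             lindent.append(t)
--         elif t.startswith('| '):
--             ltable.append(t)
--         elif t.startswith('> '):
--             lquote.append(t)
--         elif lcode or lindent or ltable or lquote:
--             yield lnormal, lcode, lindent, ltable, lquote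
--             lnormal, lcode, lindent, ltable, lquote = [t], [], [], [], []
--         else:
--             lnormal.append(t)
--     if lnormal or lcode or lindent or ltable or lquote:
--         yield lnormal, lcode, lindent, ltable, lquote
-- ===== SOURCE B (Python) =====
-- def _kind(t):
--     if t.startswith('    '):
--         return 1
--     if t.startswith(('- ', '  - ')):
--         return 2
--     if t.startswith('| '):
--         return 3
--     if t.startswith('> '):
--         return 4
--     return 0
--
--
-- def _is_special(t):
--     return _kind(t) != 0
--
--
-- def split_code(s):
--     # pass 1: cut the line list into segments; a normal line cuts when a
--     # special line has already been seen in the current segment.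
--     segments = []
--     cur = []
--     seen_special = False
--     for t in s.splitlines():
--         sp = _is_special(t)
--         if seen_special and not sp:
--             segments.append(cur)
--             cur = [t]
--             seen_special = False
--         else:
--             cur.append(t)
--             seen_special = seen_special or sp
--     if cur:
--         segments.append(cur)
--     # pass 2: one filter per bucket (kind 0 = normal, 1 = code, 2 = indent,
--     # 3 = table, 4 = quote).
--     for seg in segments:
--         yield tuple([t for t in seg if _kind(t) == k] for k in range(5))
-- ===== Notes on version B (the rewrite author's own statement) =====
-- stated objective: alternative
-- what changed: A classifies lines and cuts groups in one interleaved accumulator loop; B first cuts the line list into segments (a normal line after a seen special one starts a new segment) and then classifies each segment separately with the priority ladder.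
import Mathlib
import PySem

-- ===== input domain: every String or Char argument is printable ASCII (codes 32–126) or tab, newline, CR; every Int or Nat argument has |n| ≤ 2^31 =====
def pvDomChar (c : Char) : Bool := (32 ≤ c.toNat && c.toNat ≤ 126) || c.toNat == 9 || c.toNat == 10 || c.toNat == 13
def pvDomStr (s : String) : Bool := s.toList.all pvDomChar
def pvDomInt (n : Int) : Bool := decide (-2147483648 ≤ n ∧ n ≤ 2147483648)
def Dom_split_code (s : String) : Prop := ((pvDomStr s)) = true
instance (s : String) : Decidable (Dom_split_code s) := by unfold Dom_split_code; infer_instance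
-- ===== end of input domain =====

-- B replaces A's single interleaved accumulator loop by two passes: first cut the
-- line list into segments at each normal line that follows a special one, then
-- classify each segment's lines with the priority ladder (objective: alternative).

-- ===== PORT A =====
-- A's loop body, step for step: the prefix ladder, then the cut-and-restart branch.
def pvAstep
    (st : List (List String × List String × List String × List String × List String) ×
          List String × List String × List String × List String × List String)
    (t : String) :
    List (List String × List String × List String × List String × List String) ×
    List String × List String × List String × List String × List String :=
  match st with
  | (out, ln, lc, li, lt, lq) =>
    if PySem.Str.startswith t "    " then (out, ln, lc ++ [t], li, lt, lq)
    else if PySem.Str.startswith t "- " || PySem.Str.startswith t "  - " ||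
            PySem.Str.startswith t "    - " then (out, ln, lc, li ++ [t], lt, lq)
    else if PySem.Str.startswith t "| " then (out, ln, lc, li, lt ++ [t], lq)
    else if PySem.Str.startswith t "> " then (out, ln, lc, li, lt, lq ++ [t])
    else if !lc.isEmpty || !li.isEmpty || !lt.isEmpty || !lq.isEmpty then
      (out ++ [(ln, lc, li, lt, lq)], [t], [], [], [], [])
    else (out, ln ++ [t], lc, li, lt, lq)

def split_code (s : String) : List (List String × List String × List String × List String × List String) :=
  match (PySem.Str.splitlines s).foldl pvAstep ([], [], [], [], [], []) with
  | (out, ln, lc, li, lt, lq) =>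
    if !ln.isEmpty || !lc.isEmpty || !li.isEmpty || !lt.isEmpty || !lq.isEmpty then
      out ++ [(ln, lc, li, lt, lq)]
    else out

-- ===== PORT B =====
-- Source B's _kind: the priority ladder as a classification index (0 = normal).
def pvKind (t : String) : Nat :=
  if PySem.Str.startswith t "    " then 1
  else if PySem.Str.startswith t "- " || PySem.Str.startswith t "  - " then 2
  else if PySem.Str.startswith t "| " then 3
  else if PySem.Str.startswith t "> " then 4
  else 0

def pvIsSpecial (t : String) : Bool := pvKind t != 0

-- Source B's pass-1 loop body: cut before a normal line once a special one was seen.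
def pvBstep (st : List (List String) × List String × Bool) (t : String) :
    List (List String) × List String × Bool :=
  match st with
  | (segs, cur, sp) =>
    if sp && !pvIsSpecial t then (segs ++ [cur], [t], false)
    else (segs, cur ++ [t], sp || pvIsSpecial t)

-- Source B's pass 2: one filter per bucket kind.
def pvClassify (seg : List String) :
    List String × List String × List String × List String × List String :=
  (seg.filter (fun t => pvKind t == 0), seg.filter (fun t => pvKind t == 1),
   seg.filter (fun t => pvKind t == 2), seg.filter (fun t => pvKind t == 3),
   seg.filter (fun t => pvKind t == 4))

def split_code_alt (s : String) : List (List String × List String × List String × List String × List String) :=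
  match (PySem.Str.splitlines s).foldl pvBstep ([], [], false) with
  | (segs, cur, _) =>
    (if !cur.isEmpty then segs ++ [cur] else segs).map pvClassify

-- ===== PRECONDITION & SPEC =====
def Spec_split_code (s : String) (out : List (List String × List String × List String × List String × List String)) : Prop := out = split_code_alt s
instance (s : String) (out : List (List String × List String × List String × List String × List String)) : Decidable (Spec_split_code s out) := by unfold Spec_split_code; infer_instance

-- ===== CLAIM (what is proved, stated in full; the proofs are below) =====
def Claim_equal_split_code : Prop := ∀ (s : String), Dom_split_code s → Spec_split_code s (split_code s)

-- ===== LEMMAS AND PROOFS =====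

-- a line starting with "    - " also starts with "    " (A's third indent prefix is dead)
theorem pv_sw45 (t : String) (h : PySem.Str.startswith t "    - " = true) :
    PySem.Str.startswith t "    " = true := by
  simp only [PySem.Str.startswith_eq, PySem.Chars.startswith_iff] at h ⊢
  exact List.IsPrefix.trans (by decide) h

theorem pvClassify_append (xs : List String) (t : String) :
    pvClassify (xs ++ [t]) =
      ((pvClassify xs).1 ++ (if pvKind t == 0 then [t] else []),
       (pvClassify xs).2.1 ++ (if pvKind t == 1 then [t] else []),
       (pvClassify xs).2.2.1 ++ (if pvKind t == 2 then [t] else []),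
       (pvClassify xs).2.2.2.1 ++ (if pvKind t == 3 then [t] else []),
       (pvClassify xs).2.2.2.2 ++ (if pvKind t == 4 then [t] else [])) := by
  simp [pvClassify, List.filter_append, List.filter_cons]

theorem pv_isEmpty_app (l : List String) (t : String) : (l ++ [t]).isEmpty = false := by
  cases l <;> rfl

-- the main loop invariant: A's fold state mirrors B's segment state
theorem pv_main (lines : List String) :
    ∀ (segs : List (List String)) (cur ln lc li lt lq : List String) (sp : Bool),
    (ln, lc, li, lt, lq) = pvClassify cur →
    sp = (!lc.isEmpty || !li.isEmpty || !lt.isEmpty || !lq.isEmpty) →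
    (cur.isEmpty = (ln.isEmpty && lc.isEmpty && li.isEmpty && lt.isEmpty && lq.isEmpty)) →
    (match lines.foldl pvAstep (segs.map pvClassify, ln, lc, li, lt, lq) with
     | (out, ln', lc', li', lt', lq') =>
       if !ln'.isEmpty || !lc'.isEmpty || !li'.isEmpty || !lt'.isEmpty || !lq'.isEmpty then
         out ++ [(ln', lc', li', lt', lq')]
       else out) =
    (match lines.foldl pvBstep (segs, cur, sp) with
     | (segs', cur', _) =>
       (if !cur'.isEmpty then segs' ++ [cur'] else segs').map pvClassify) := by
  induction lines with
  | nil =>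
    intro segs cur ln lc li lt lq sp hcls hsp hemp
    simp only [List.foldl_nil]
    cases hc : cur.isEmpty with
    | true =>
      rw [hc] at hemp
      have hln : ln.isEmpty = true := by
        cases h : ln.isEmpty <;> simp [h] at hemp ⊢
      have hlc : lc.isEmpty = true := by
        cases h : lc.isEmpty <;> simp [h] at hemp ⊢
      have hli : li.isEmpty = true := by
        cases h : li.isEmpty <;> simp [h] at hemp ⊢
      have hlt : lt.isEmpty = true := by
        cases h : lt.isEmpty <;> simp [h] at hemp ⊢
      have hlq : lq.isEmpty = true := by
        cases h : lq.isEmpty <;> simp [h] at hemp ⊢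
      simp [hln, hlc, hli, hlt, hlq, hc]
    | false =>
      have h3 : (!ln.isEmpty || !lc.isEmpty || !li.isEmpty || !lt.isEmpty || !lq.isEmpty) = true := by
        have : (!ln.isEmpty || !lc.isEmpty || !li.isEmpty || !lt.isEmpty || !lq.isEmpty)
             = !(ln.isEmpty && lc.isEmpty && li.isEmpty && lt.isEmpty && lq.isEmpty) := by
          simp [Bool.not_and]
        rw [this, ← hemp, hc]
        rfl
      simp only [h3, if_true, hc]
      simp [hcls]
  | cons t rest ih =>
    intro segs cur ln lc li lt lq sp hcls hsp hemp
    simp only [List.foldl_cons]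
    cases h1 : PySem.Str.startswith t "    " with
    | true =>
      have hk : pvKind t = 1 := by unfold pvKind; rw [h1]; rfl
      have hspecial : pvIsSpecial t = true := by unfold pvIsSpecial; rw [hk]; rfl
      have hA : pvAstep (segs.map pvClassify, ln, lc, li, lt, lq) t =
          (segs.map pvClassify, ln, lc ++ [t], li, lt, lq) := by
        unfold pvAstep; dsimp only; rw [if_pos h1]
      have hB : pvBstep (segs, cur, sp) t = (segs, cur ++ [t], sp || pvIsSpecial t) := by
        unfold pvBstep; dsimp only; rw [if_neg (by simp [hspecial])]
      rw [hA, hB]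
      exact ih segs (cur ++ [t]) ln (lc ++ [t]) li lt lq (sp || pvIsSpecial t)
        (by rw [pvClassify_append, ← hcls, hk]; simp)
        (by simp [hspecial, pv_isEmpty_app]) (by simp [pv_isEmpty_app])
    | false =>
    cases h2a : PySem.Str.startswith t "- " with
    | true =>
      have h45 : PySem.Str.startswith t "    - " = false := by
        cases h : PySem.Str.startswith t "    - "
        · rfl
        · rw [pv_sw45 t h] at h1; exact absurd h1 (by simp)
      have hk : pvKind t = 2 := by unfold pvKind; rw [h1, h2a]; rfl
      have hspecial : pvIsSpecial t = true := by unfold pvIsSpecial; rw [hk]; rfl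
      have hA : pvAstep (segs.map pvClassify, ln, lc, li, lt, lq) t =
          (segs.map pvClassify, ln, lc, li ++ [t], lt, lq) := by
        unfold pvAstep
        dsimp only
        rw [if_neg (by rw [h1]; decide), if_pos (by rw [h2a]; simp)]
      have hB : pvBstep (segs, cur, sp) t = (segs, cur ++ [t], sp || pvIsSpecial t) := by
        unfold pvBstep; dsimp only; rw [if_neg (by simp [hspecial])]
      rw [hA, hB]
      exact ih segs (cur ++ [t]) ln lc (li ++ [t]) lt lq (sp || pvIsSpecial t)
        (by rw [pvClassify_append, ← hcls, hk]; simp)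
        (by simp [hspecial, pv_isEmpty_app]) (by simp [pv_isEmpty_app])
    | false =>
    cases h2b : PySem.Str.startswith t "  - " with
    | true =>
      have h45 : PySem.Str.startswith t "    - " = false := by
        cases h : PySem.Str.startswith t "    - "
        · rfl
        · rw [pv_sw45 t h] at h1; exact absurd h1 (by simp)
      have hk : pvKind t = 2 := by unfold pvKind; rw [h1, h2a, h2b]; rfl
      have hspecial : pvIsSpecial t = true := by unfold pvIsSpecial; rw [hk]; rfl
      have hA : pvAstep (segs.map pvClassify, ln, lc, li, lt, lq) t =
          (segs.map pvClassify, ln, lc, li ++ [t], lt, lq) := by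
        unfold pvAstep
        dsimp only
        rw [if_neg (by rw [h1]; decide), if_pos (by rw [h2b]; simp)]
      have hB : pvBstep (segs, cur, sp) t = (segs, cur ++ [t], sp || pvIsSpecial t) := by
        unfold pvBstep; dsimp only; rw [if_neg (by simp [hspecial])]
      rw [hA, hB]
      exact ih segs (cur ++ [t]) ln lc (li ++ [t]) lt lq (sp || pvIsSpecial t)
        (by rw [pvClassify_append, ← hcls, hk]; simp)
        (by simp [hspecial, pv_isEmpty_app]) (by simp [pv_isEmpty_app])
    | false =>
    have h45 : PySem.Str.startswith t "    - " = false := by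
      cases h : PySem.Str.startswith t "    - "
      · rfl
      · rw [pv_sw45 t h] at h1; exact absurd h1 (by simp)
    cases h3 : PySem.Str.startswith t "| " with
    | true =>
      have hk : pvKind t = 3 := by unfold pvKind; rw [h1, h2a, h2b, h3]; rfl
      have hspecial : pvIsSpecial t = true := by unfold pvIsSpecial; rw [hk]; rfl
      have hA : pvAstep (segs.map pvClassify, ln, lc, li, lt, lq) t =
          (segs.map pvClassify, ln, lc, li, lt ++ [t], lq) := by
        unfold pvAstep
        dsimp only
        rw [if_neg (by rw [h1]; decide), if_neg (by rw [h2a, h2b, h45]; decide), if_pos h3]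
      have hB : pvBstep (segs, cur, sp) t = (segs, cur ++ [t], sp || pvIsSpecial t) := by
        unfold pvBstep; dsimp only; rw [if_neg (by simp [hspecial])]
      rw [hA, hB]
      exact ih segs (cur ++ [t]) ln lc li (lt ++ [t]) lq (sp || pvIsSpecial t)
        (by rw [pvClassify_append, ← hcls, hk]; simp)
        (by simp [hspecial, pv_isEmpty_app]) (by simp [pv_isEmpty_app])
    | false =>
    cases h4 : PySem.Str.startswith t "> " with
    | true =>
      have hk : pvKind t = 4 := by unfold pvKind; rw [h1, h2a, h2b, h3, h4]; rfl
      have hspecial : pvIsSpecial t = true := by unfold pvIsSpecial; rw [hk]; rfl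
      have hA : pvAstep (segs.map pvClassify, ln, lc, li, lt, lq) t =
          (segs.map pvClassify, ln, lc, li, lt, lq ++ [t]) := by
        unfold pvAstep
        dsimp only
        rw [if_neg (by rw [h1]; decide), if_neg (by rw [h2a, h2b, h45]; decide),
            if_neg (by rw [h3]; decide), if_pos h4]
      have hB : pvBstep (segs, cur, sp) t = (segs, cur ++ [t], sp || pvIsSpecial t) := by
        unfold pvBstep; dsimp only; rw [if_neg (by simp [hspecial])]
      rw [hA, hB]
      exact ih segs (cur ++ [t]) ln lc li lt (lq ++ [t]) (sp || pvIsSpecial t)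
        (by rw [pvClassify_append, ← hcls, hk]; simp)
        (by simp [hspecial, pv_isEmpty_app]) (by simp [pv_isEmpty_app])
    | false =>
    -- normal line
    have hk : pvKind t = 0 := by unfold pvKind; rw [h1, h2a, h2b, h3, h4]; rfl
    have hspecial : pvIsSpecial t = false := by unfold pvIsSpecial; rw [hk]; rfl
    cases hsp2 : sp with
    | true =>
      have hbuck : (!lc.isEmpty || !li.isEmpty || !lt.isEmpty || !lq.isEmpty) = true := by
        rw [← hsp]; exact hsp2
      have hA : pvAstep (segs.map pvClassify, ln, lc, li, lt, lq) t =
          ((segs ++ [cur]).map pvClassify, [t], [], [], [], []) := by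
        unfold pvAstep
        dsimp only
        rw [if_neg (by rw [h1]; decide), if_neg (by rw [h2a, h2b, h45]; decide),
            if_neg (by rw [h3]; decide), if_neg (by rw [h4]; decide), if_pos hbuck,
            List.map_append, List.map_singleton, ← hcls]
      have hB : pvBstep (segs, cur, true) t = (segs ++ [cur], [t], false) := by
        unfold pvBstep; dsimp only; rw [if_pos (by rw [hspecial]; rfl)]
      rw [hA, hB]
      exact ih (segs ++ [cur]) [t] [t] [] [] [] [] false
        (by simp [pvClassify, hk])
        (by simp) (by simp)
    | false =>
      have hbuck : (!lc.isEmpty || !li.isEmpty || !lt.isEmpty || !lq.isEmpty) = false := by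
        rw [← hsp]; exact hsp2
      have hA : pvAstep (segs.map pvClassify, ln, lc, li, lt, lq) t =
          (segs.map pvClassify, ln ++ [t], lc, li, lt, lq) := by
        unfold pvAstep
        dsimp only
        rw [if_neg (by rw [h1]; decide), if_neg (by rw [h2a, h2b, h45]; decide),
            if_neg (by rw [h3]; decide), if_neg (by rw [h4]; decide), if_neg (by simp [hbuck])]
      have hB : pvBstep (segs, cur, false) t = (segs, cur ++ [t], false || pvIsSpecial t) := by
        unfold pvBstep; dsimp only; rw [if_neg (by simp)]
      rw [hA, hB]
      exact ih segs (cur ++ [t]) (ln ++ [t]) lc li lt lq (false || pvIsSpecial t)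
        (by rw [pvClassify_append, ← hcls, hk]; simp)
        (by simp [hspecial, ← hsp, hsp2]) (by simp [pv_isEmpty_app])

-- ===== VERDICT (by name: the statement is the Claim_ definition above) =====
theorem split_code_spec : Claim_equal_split_code := by
  intro s _
  unfold Spec_split_code split_code split_code_alt
  have := pv_main (PySem.Str.splitlines s) [] [] [] [] [] [] [] false
    (by rfl) (by rfl) (by rfl)
  simpa using this
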